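-- pv_equiv track=rewrite | github.com/devdagim/jafer_books_store | telegram_bot/controllers/preference_controller.py | _btn_grid
-- ===== SOURCE A (Python) =====
-- from math import ceil
--
-- def _btn_grid(total_list, list_per_page, current_page):
--     total_page = ceil(total_list / list_per_page)
--     grid = []
--
--     if current_page < total_page:
--         grid.extend([2] * 4)
--     elif current_page == total_page:
--         remaining_items = total_list % list_per_page
--
--         if remaining_items != 0:
--             while remaining_items > 0:
--                 if remaining_items >= 2:
--                     grid.append(2)
--                     remaining_items -= 2
--                 else:
--                     grid.append(remaining_items)
--                     remaining_items = 0
--         else: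
--             grid.extend([2] * 4)
--
--     return grid
-- ===== SOURCE B (Python) =====
-- def _btn_grid(total_list, list_per_page, current_page):
--     # closed-form build of the button grid: no loop, the 2/1 counts come from arithmetic
--     total_page = -(-total_list // list_per_page)  # integer ceiling
--     if current_page < total_page:
--         return [2, 2, 2, 2]
--     if current_page != total_page:
--         return []
--     r = total_list % list_per_page
--     if r == 0:
--         return [2, 2, 2, 2]
--     return [2] * (r // 2) + [1] * (r % 2)
-- ===== Notes on version B (the rewrite author's own statement) =====
-- stated objective: simpler
-- what changed: Replaces the while-loop that decomposes the remainder by repeated subtraction of 2 with a direct closed-form build [2]*(r//2)+[1]*(r%2) and flattens the branches into early returns; Pre_ excludes non-positive list_per_page (zero raises ZeroDivisionError, and a negative page size is outside pagination's natural domain, where A's empty grid on a negative remainder is a loop artifact).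
-- outside the precondition, e.g. on _btn_grid(8, -3, -2): A returns [], B returns [1]
import Mathlib
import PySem

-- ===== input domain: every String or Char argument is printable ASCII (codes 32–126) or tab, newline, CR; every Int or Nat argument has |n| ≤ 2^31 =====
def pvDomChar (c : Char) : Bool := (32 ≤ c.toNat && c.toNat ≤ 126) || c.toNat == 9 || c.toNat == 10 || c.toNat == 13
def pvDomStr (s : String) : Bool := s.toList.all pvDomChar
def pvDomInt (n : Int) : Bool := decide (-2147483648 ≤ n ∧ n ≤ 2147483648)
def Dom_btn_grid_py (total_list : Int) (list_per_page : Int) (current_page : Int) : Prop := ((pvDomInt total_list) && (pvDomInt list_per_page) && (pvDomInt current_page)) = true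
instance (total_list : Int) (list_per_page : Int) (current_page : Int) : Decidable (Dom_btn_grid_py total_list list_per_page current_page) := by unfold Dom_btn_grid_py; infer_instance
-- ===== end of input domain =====

-- B replaces A's while-loop remainder decomposition with a closed-form build ([2]*(r//2)+[1]*(r%2)); objective: simpler.


-- ===== PORT A =====
-- the while loop: grid grows by append; ported as structural recursion on the decreasing remainder
def btnGridLoop (r : Int) : List Int :=
  if h : r > 0 then
    if r ≥ 2 then 2 :: btnGridLoop (r - 2)
    else [r]
  else []
termination_by r.toNat
decreasing_by omega

-- ceil(total_list / list_per_page): on Dom the float quotient rounds to the exact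
-- ceiling, ported as the integer ceiling -((-a) // b)
def btn_grid_py (total_list : Int) (list_per_page : Int) (current_page : Int) : List Int :=
  let total_page := -(PySem.Int.floordiv (-total_list) list_per_page)
  if current_page < total_page then [2, 2, 2, 2]
  else if current_page = total_page then
    let remaining_items := PySem.Int.mod total_list list_per_page
    if remaining_items ≠ 0 then btnGridLoop remaining_items
    else [2, 2, 2, 2]
  else []

-- ===== PORT B =====
-- Python's [2]*(r//2) with a negative count is the empty list; .toNat matches that clamping
def btn_grid_py_alt (total_list : Int) (list_per_page : Int) (current_page : Int) : List Int :=
  let total_page := -(PySem.Int.floordiv (-total_list) list_per_page)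
  if current_page < total_page then [2, 2, 2, 2]
  else if current_page ≠ total_page then []
  else
    let r := PySem.Int.mod total_list list_per_page
    if r = 0 then [2, 2, 2, 2]
    else List.replicate (PySem.Int.floordiv r 2).toNat 2
           ++ List.replicate (PySem.Int.mod r 2).toNat 1

-- ===== PRECONDITION & SPEC =====
-- Pre_ excludes non-positive list_per_page: zero raises ZeroDivisionError, and a negative page
-- size is outside pagination's natural domain (A's empty grid on a negative remainder there is
-- an artifact of the while loop never running).
def Pre_btn_grid_py (total_list : Int) (list_per_page : Int) (current_page : Int) : Prop := 0 < list_per_page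
instance (total_list : Int) (list_per_page : Int) (current_page : Int) : Decidable (Pre_btn_grid_py total_list list_per_page current_page) := by unfold Pre_btn_grid_py; infer_instance
def pvWitness_btn_grid_py : Int × Int × Int := (7, 3, 3)

def Spec_btn_grid_py (total_list : Int) (list_per_page : Int) (current_page : Int) (out : List Int) : Prop := out = btn_grid_py_alt total_list list_per_page current_page
instance (total_list : Int) (list_per_page : Int) (current_page : Int) (out : List Int) : Decidable (Spec_btn_grid_py total_list list_per_page current_page out) := by unfold Spec_btn_grid_py; infer_instance

-- ===== CLAIM (what is proved, stated in full; the proofs are below) =====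
def Claim_equal_btn_grid_py : Prop := ∀ (total_list : Int) (list_per_page : Int) (current_page : Int), Dom_btn_grid_py total_list list_per_page current_page → Pre_btn_grid_py total_list list_per_page current_page → Spec_btn_grid_py total_list list_per_page current_page (btn_grid_py total_list list_per_page current_page)

-- ===== LEMMAS AND PROOFS =====

-- the while loop computes the closed form, for non-negative remainders
theorem btnGridLoop_eq (r : Int) (h : 0 ≤ r) :
    btnGridLoop r = List.replicate (PySem.Int.floordiv r 2).toNat 2
      ++ List.replicate (PySem.Int.mod r 2).toNat 1 := by
  rw [PySem.Int.floordiv_eq_ediv_of_pos (a := r) (by omega),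
      PySem.Int.mod_eq_emod_of_pos (a := r) (by omega)]
  unfold btnGridLoop
  by_cases h0 : r > 0
  · rw [dif_pos h0]
    by_cases h2 : r ≥ 2
    · rw [if_pos h2, btnGridLoop_eq (r - 2) (by omega),
          PySem.Int.floordiv_eq_ediv_of_pos (a := r - 2) (by omega),
          PySem.Int.mod_eq_emod_of_pos (a := r - 2) (by omega)]
      have hq : (r / 2).toNat = ((r - 2) / 2).toNat + 1 := by omega
      have hm : (r % 2).toNat = ((r - 2) % 2).toNat := by omega
      rw [hq, hm, List.replicate_succ]
      simp
    · rw [if_neg h2]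
      have hr1 : r = 1 := by omega
      subst hr1
      decide
  · rw [dif_neg h0]
    have hr0 : r = 0 := by omega
    subst hr0
    decide
termination_by r.toNat
decreasing_by omega

-- ===== VERDICT (by name: the statement is the Claim_ definition above) =====
theorem btn_grid_py_spec : Claim_equal_btn_grid_py := by
  intro tl lpp cp _ hpre
  unfold Pre_btn_grid_py at hpre
  unfold Spec_btn_grid_py btn_grid_py btn_grid_py_alt
  set tp := -(PySem.Int.floordiv (-tl) lpp) with htp
  by_cases hlt : cp < tp
  · simp [hlt]
  · by_cases heq : cp = tp
    · simp only [heq, ne_eq, not_true_eq_false, if_false,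
        if_neg (lt_irrefl tp)]
      set r := PySem.Int.mod tl lpp with hr
      have hrnn : 0 ≤ r := by
        rw [hr, PySem.Int.mod_eq_emod_of_pos hpre]
        exact Int.emod_nonneg tl (by omega)
      by_cases hr0 : r = 0
      · simp [hr0]
      · simp only [hr0, if_false, not_false_eq_true, if_true]
        exact btnGridLoop_eq r hrnn
    · simp [hlt, heq]
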